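-- pv_equiv track=rewrite | github.com/erinepshovel-code/aimmh | backend/routes/chat.py | _normalize_shared_pairs
-- ===== SOURCE A (Python) =====
-- from typing import List, Dict, Any
--
-- def _normalize_shared_pairs(shared_pairs: Dict[str, List[str]] | None, models: List[str]) -> Dict[str, List[str]]:
--     normalized: Dict[str, List[str]] = {model: [] for model in models}
--     if not isinstance(shared_pairs, dict):
--         return normalized
--
--     valid_models = set(models)
--     for model, peers in shared_pairs.items():
--         if model not in valid_models or not isinstance(peers, list):
--             continue
--         normalized[model] = [peer for peer in peers if isinstance(peer, str) and peer in valid_models and peer != model]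
--     return normalized
-- ===== SOURCE B (Python) =====
-- from typing import List, Dict
--
-- def _normalize_shared_pairs(shared_pairs: Dict[str, List[str]] | None, models: List[str]) -> Dict[str, List[str]]:
--     valid = set(models)
--     result: Dict[str, List[str]] = {}
--     for m in models:
--         peers = shared_pairs.get(m) if isinstance(shared_pairs, dict) else None
--         if isinstance(peers, list):
--             result[m] = [p for p in peers if isinstance(p, str) and p in valid and p != m]
--         else:
--             result[m] = []
--     return result
-- ===== Notes on version B (the rewrite author's own statement) =====
-- stated objective: idiomatic
-- what changed: B builds the result by a single loop over models with a dict .get lookup per model (missing/None handled uniformly as no peers), instead of A's pre-building a zero dict and then iterating shared_pairs.items() with a validity membership guard.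
import Mathlib
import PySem

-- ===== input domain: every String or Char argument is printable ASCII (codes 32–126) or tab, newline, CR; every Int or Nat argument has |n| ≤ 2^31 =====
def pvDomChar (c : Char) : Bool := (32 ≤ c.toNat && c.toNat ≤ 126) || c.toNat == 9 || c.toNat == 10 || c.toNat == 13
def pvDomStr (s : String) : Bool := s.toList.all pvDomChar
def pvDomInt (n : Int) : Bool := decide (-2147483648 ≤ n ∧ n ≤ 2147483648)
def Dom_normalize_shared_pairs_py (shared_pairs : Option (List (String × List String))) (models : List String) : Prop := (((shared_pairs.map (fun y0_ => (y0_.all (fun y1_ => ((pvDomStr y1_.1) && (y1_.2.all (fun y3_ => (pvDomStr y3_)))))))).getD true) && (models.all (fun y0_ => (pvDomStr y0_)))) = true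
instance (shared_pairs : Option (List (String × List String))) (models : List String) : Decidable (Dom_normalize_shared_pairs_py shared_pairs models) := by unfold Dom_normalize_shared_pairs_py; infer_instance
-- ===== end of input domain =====

-- B iterates over the output keys (models) with dict lookups instead of over shared_pairs.items()
-- with membership guards: same return value, a plainer decomposition (objective: idiomatic/simpler).

-- ===== PORT A =====
def normalize_shared_pairs_py (shared_pairs : Option (List (String × List String))) (models : List String) : List (String × List String) :=
  -- normalized = {model: [] for model in models}
  let normalized : PySem.Dict String (List String) :=
    models.foldl (fun d m => d.insert m []) PySem.Dict.empty
  match shared_pairs with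
  | none => normalized.items          -- not a dict: return normalized
  | some l =>
    let valid : PySem.Set String := PySem.Set.ofList models
    -- the Python dict value of the assoc-list argument (insertion order, later pairs overwrite)
    let spd : PySem.Dict String (List String) :=
      l.foldl (fun d p => d.insert p.1 p.2) PySem.Dict.empty
    -- for model, peers in shared_pairs.items(): …  (peers is always a list here: typed port)
    (spd.items.foldl
      (fun n p =>
        if valid.contains p.1 then
          n.insert p.1 (p.2.filter (fun peer => valid.contains peer && peer != p.1))
        else n)
      normalized).items

-- ===== PORT B =====
def normalize_shared_pairs_py_alt (shared_pairs : Option (List (String × List String))) (models : List String) : List (String × List String) :=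
  let valid : PySem.Set String := PySem.Set.ofList models
  let spd? : Option (PySem.Dict String (List String)) :=
    shared_pairs.map (fun l => l.foldl (fun d p => d.insert p.1 p.2) PySem.Dict.empty)
  (models.foldl
    (fun r m =>
      -- peers = shared_pairs.get(m) if isinstance(shared_pairs, dict) else None
      let peers : Option (List String) := match spd? with | some d => d.get? m | none => none
      r.insert m (match peers with
        | some ps => ps.filter (fun p => valid.contains p && p != m)
        | none => []))
    PySem.Dict.empty).items

-- ===== PRECONDITION & SPEC =====
def Spec_normalize_shared_pairs_py (shared_pairs : Option (List (String × List String))) (models : List String) (out : List (String × List String)) : Prop := out = normalize_shared_pairs_py_alt shared_pairs models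
instance (shared_pairs : Option (List (String × List String))) (models : List String) (out : List (String × List String)) : Decidable (Spec_normalize_shared_pairs_py shared_pairs models out) := by unfold Spec_normalize_shared_pairs_py; infer_instance

-- ===== CLAIM (what is proved, stated in full; the proofs are below) =====
def Claim_equal_normalize_shared_pairs_py : Prop := ∀ (shared_pairs : Option (List (String × List String))) (models : List String), Dom_normalize_shared_pairs_py shared_pairs models → Spec_normalize_shared_pairs_py shared_pairs models (normalize_shared_pairs_py shared_pairs models)

-- ===== LEMMAS AND PROOFS =====

-- a Dict lookup is the first (here: unique) matching item
lemma dict_get?_eq_find? {ν : Type} (d : PySem.Dict String ν) (k : String) :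
    d.get? k = (d.items.find? (fun p => p.1 == k)).map (·.2) := by
  cases d with
  | mk items =>
    induction items with
    | nil => rfl
    | cons p rest ih => simp [PySem.Dict.get?, List.find?] at *

-- inserting m ↦ g m for every m in l: items are exactly (Set.update s l) tagged by g
lemma items_foldl_insert_fun {ν : Type} (l : List String) (g : String → ν)
    (s : List String) (hs : s.Nodup) :
    ((l.foldl (fun r m => r.insert m (g m))
        (PySem.Dict.mk (s.map (fun m => (m, g m))))).items)
      = (PySem.Set.update s l).map (fun m => (m, g m)) := by
  induction l generalizing s with
  | nil => simp [PySem.Set.update]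
  | cons x l ih =>
    have hkeys : (PySem.Dict.mk (s.map (fun m => (m, g m)))).keys = s := by
      simp [PySem.Dict.keys, Function.comp_def]
    have hcont : (PySem.Dict.mk (s.map (fun m => (m, g m)))).contains x = decide (x ∈ s) := by
      rw [PySem.Dict.contains_eq_decide_mem_keys, hkeys]
    by_cases hx : x ∈ s
    · have hins : (PySem.Dict.mk (s.map (fun m => (m, g m)))).insert x (g x)
          = PySem.Dict.mk (s.map (fun m => (m, g m))) := by
        apply PySem.Dict.ext
        rw [PySem.Dict.items_insert_of_contains _ _ (by simp [hcont, hx])]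
        simp only [List.map_map]
        apply List.map_congr_left
        intro m _
        by_cases hmx : m = x <;> simp [hmx]
      have hupd : PySem.Set.update s (x :: l) = PySem.Set.update s l := by
        simp [PySem.Set.update, PySem.Set.add, hx]
      simp only [List.foldl_cons, hins, hupd, ih s hs]
    · have hins : (PySem.Dict.mk (s.map (fun m => (m, g m)))).insert x (g x)
          = PySem.Dict.mk ((s ++ [x]).map (fun m => (m, g m))) := by
        apply PySem.Dict.ext
        rw [PySem.Dict.items_insert_of_not_contains _ _ (by simp [hcont, hx])]
        simp
      have hupd : PySem.Set.update s (x :: l) = PySem.Set.update (s ++ [x]) l := by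
        simp [PySem.Set.update, PySem.Set.add, hx]
      have hnd : (s ++ [x]).Nodup :=
        List.Nodup.append hs (List.nodup_singleton x)
          (by intro a ha hb; simp only [List.mem_singleton] at hb; exact hx (hb ▸ ha))
      simp only [List.foldl_cons, hins, hupd, ih (s ++ [x]) hnd]

-- A's loop over a nodup-key pairs list, conditionally overwriting keys that lie in s
lemma items_foldl_cond_insert (pairs : List (String × List String))
    (c : String → Bool) (f : String × List String → List String)
    (s : List String) (g : String → List String)
    (hk : (pairs.map (·.1)).Nodup)
    (hc : ∀ p ∈ pairs, c p.1 = true → p.1 ∈ s) :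
    (pairs.foldl (fun n p => if c p.1 then n.insert p.1 (f p) else n)
        (PySem.Dict.mk (s.map (fun m => (m, g m))))).items
      = s.map (fun m => (m, if c m then
          (match pairs.find? (fun q => q.1 == m) with
           | some q => f q | none => g m) else g m)) := by
  induction pairs generalizing g with
  | nil => simp
  | cons p rest ih =>
    have hk' : (rest.map (·.1)).Nodup := (List.nodup_cons.mp hk).2
    have hpk : p.1 ∉ rest.map (·.1) := (List.nodup_cons.mp hk).1
    by_cases hcp : c p.1 = true
    · have hmem : p.1 ∈ s := hc p (List.mem_cons_self) hcp
      have hkeys : (PySem.Dict.mk (s.map (fun m => (m, g m)))).keys = s := by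
        simp [PySem.Dict.keys, Function.comp_def]
      have hcont : (PySem.Dict.mk (s.map (fun m => (m, g m)))).contains p.1 = true := by
        rw [PySem.Dict.contains_eq_decide_mem_keys, hkeys]; simpa
      have hins : (PySem.Dict.mk (s.map (fun m => (m, g m)))).insert p.1 (f p)
          = PySem.Dict.mk (s.map (fun m => (m, if m = p.1 then f p else g m))) := by
        apply PySem.Dict.ext
        rw [PySem.Dict.items_insert_of_contains _ _ hcont]
        simp only [List.map_map]
        apply List.map_congr_left
        intro m _
        by_cases hmx : m = p.1 <;> simp [hmx]
      rw [List.foldl_cons, if_pos hcp, hins,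
        ih (fun m => if m = p.1 then f p else g m) hk'
          (fun q hq hcq => hc q (List.mem_cons_of_mem _ hq) hcq)]
      apply List.map_congr_left
      intro m _
      by_cases hcm : c m = true
      · simp only [hcm, if_true]
        by_cases hmp : p.1 = m
        · have hfind : rest.find? (fun q => q.1 == m) = none := by
            rw [List.find?_eq_none]
            intro q hq
            simp only [beq_iff_eq]
            intro hqm
            exact hpk (hmp ▸ hqm ▸ List.mem_map_of_mem hq)
          simp [List.find?, hmp, hfind]
        · have hbeq : (p.1 == m) = false := by simpa using hmp
          simp [List.find?, hbeq, Ne.symm hmp]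
      · have hmp : ¬ m = p.1 := fun h => hcm (h ▸ hcp)
        simp [hcm, hmp]
    · rw [List.foldl_cons, if_neg hcp,
        ih g hk' (fun q hq hcq => hc q (List.mem_cons_of_mem _ hq) hcq)]
      apply List.map_congr_left
      intro m _
      by_cases hcm : c m = true
      · have hmp : ¬ p.1 = m := fun h => hcp (h ▸ hcm)
        have hbeq : (p.1 == m) = false := by simpa using hmp
        simp [hcm, List.find?, hbeq]
      · simp [hcm]

-- items of {m: g m for m in models}, from the empty start
lemma items_build (models : List String) {ν : Type} (g : String → ν) :
    ((models.foldl (fun r m => r.insert m (g m)) PySem.Dict.empty).items)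
      = (PySem.Set.ofList models).map (fun m => (m, g m)) := by
  have := items_foldl_insert_fun models g [] List.nodup_nil
  simpa [PySem.Set.ofList, PySem.Set.update, PySem.Dict.empty] using this

-- ===== VERDICT (by name: the statement is the Claim_ definition above) =====
theorem normalize_shared_pairs_py_spec : Claim_equal_normalize_shared_pairs_py := by
  intro shared_pairs models _
  unfold Spec_normalize_shared_pairs_py normalize_shared_pairs_py normalize_shared_pairs_py_alt
  cases shared_pairs with
  | none =>
    simp only [Option.map_none]
  | some l =>
    simp only [Option.map_some]
    set valid := PySem.Set.ofList models with hvalid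
    set spd : PySem.Dict String (List String) :=
      l.foldl (fun d p => d.insert p.1 p.2) PySem.Dict.empty with hspd
    -- A's initial dict, characterised
    have hinit : (models.foldl (fun d m => d.insert m ([] : List String)) PySem.Dict.empty)
        = PySem.Dict.mk (valid.map (fun m => (m, ([] : List String)))) := by
      apply PySem.Dict.ext
      rw [items_build models (fun _ => ([] : List String))]
    have hknd : (spd.items.map (·.1)).Nodup := by
      have : spd.keys.Nodup := by
        rw [hspd]
        exact PySem.Dict.nodup_keys_foldl_insert_key l Prod.fst (fun _ p => p.2)
          PySem.Dict.empty PySem.Dict.nodup_keys_empty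
      simpa [PySem.Dict.keys] using this
    rw [hinit, items_foldl_cond_insert spd.items (fun k => valid.contains k)
      (fun p => p.2.filter (fun peer => valid.contains peer && peer != p.1))
      valid (fun _ => []) hknd
      (by
        intro p _ hcp
        exact List.contains_iff_mem.mp hcp),
      ]
    have hB := items_build models (fun m => (match spd.get? m with
        | some ps => ps.filter (fun p => valid.contains p && p != m)
        | none => []))
    rw [hB]
    apply List.map_congr_left
    intro m hm
    have hcm : valid.contains m = true := by
      rw [hvalid]; exact List.contains_iff_mem.mpr hm
    simp only [hcm, if_true]
    rw [dict_get?_eq_find?]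
    cases hfind : spd.items.find? (fun q => q.1 == m) with
    | none => simp
    | some q =>
      have hq : q.1 = m := by
        have := List.find?_some hfind
        simpa using this
      simp [hq]
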